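-- pv_equiv track=rewrite | github.com/alexpan82/bioinformatics_scripts | rna_seq/highly_specific_app/klDiv_dat.py | count_consecutive_zeros
-- ===== SOURCE A (Python) =====
-- def count_consecutive_zeros(cov_list):
-- 	count_fprime, count_tprime = (0, 0)
-- 	# Number of consecutive exons w/ zero coverage from 5'-end
-- 	for c in cov_list:
-- 		if c == 0:
-- 			count_fprime += 1
-- 		else:
-- 			break
-- 	# Number of consecutive exons w/ zero coverage from 3'-end
-- 	for c in cov_list[::-1]:
-- 		if c == 0:
-- 			count_tprime += 1
-- 		else:
-- 			break
-- 	return count_fprime, count_tprime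
-- ===== SOURCE B (Python) =====
-- def count_consecutive_zeros(cov_list):
--     lead, trail, seen = 0, 0, False
--     for c in cov_list:
--         if c == 0:
--             trail += 1
--             if not seen:
--                 lead += 1
--         else:
--             seen = True
--             trail = 0
--     return (lead, trail)
-- ===== Notes on version B (the rewrite author's own statement) =====
-- stated objective: alternative
-- what changed: B makes one forward pass with an accumulator (lead frozen by a seen-nonzero flag, trail reset to 0 at each nonzero) instead of A's two directional scans with break over the list and its reversal.
import Mathlib
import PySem

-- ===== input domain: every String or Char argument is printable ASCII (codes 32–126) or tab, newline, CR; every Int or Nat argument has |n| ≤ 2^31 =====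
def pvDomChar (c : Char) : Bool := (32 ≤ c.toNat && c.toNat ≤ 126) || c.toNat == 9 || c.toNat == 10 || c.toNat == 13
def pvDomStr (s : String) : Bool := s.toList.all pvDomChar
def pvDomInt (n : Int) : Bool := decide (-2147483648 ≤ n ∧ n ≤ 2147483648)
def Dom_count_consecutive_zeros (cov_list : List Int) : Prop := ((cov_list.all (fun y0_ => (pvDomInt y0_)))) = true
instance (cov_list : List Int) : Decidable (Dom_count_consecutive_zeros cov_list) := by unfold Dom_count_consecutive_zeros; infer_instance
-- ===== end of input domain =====

-- B replaces A's two directional break-loops (forward, and over the reversed list) by one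
-- forward pass with an accumulator (lead, trail, seen); alternative decomposition, same cost.

-- ===== PORT A =====
-- 'for c in cov_list: if c == 0: count += 1 else: break' — counts leading zeros, stops at first non-zero
def pvCountLead : List Int → Int
  | [] => 0
  | c :: rest => if c == 0 then 1 + pvCountLead rest else 0

def count_consecutive_zeros (cov_list : List Int) : Int × Int :=
  -- cov_list[::-1] is the reversed list (exact: full slice with step -1)
  (pvCountLead cov_list, pvCountLead cov_list.reverse)

-- ===== PORT B =====
-- loop body: c == 0 → trail += 1, lead += 1 unless seen; c ≠ 0 → seen := True, trail := 0
def pvStep (st : Int × Int × Bool) (c : Int) : Int × Int × Bool :=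
  if c == 0 then (st.1 + (if st.2.2 then 0 else 1), st.2.1 + 1, st.2.2)
  else (st.1, 0, true)

def count_consecutive_zeros_alt (cov_list : List Int) : Int × Int :=
  let st := cov_list.foldl pvStep (0, 0, false)
  (st.1, st.2.1)

-- ===== PRECONDITION & SPEC =====
def Spec_count_consecutive_zeros (cov_list : List Int) (out : Int × Int) : Prop := out = count_consecutive_zeros_alt cov_list
instance (cov_list : List Int) (out : Int × Int) : Decidable (Spec_count_consecutive_zeros cov_list out) := by unfold Spec_count_consecutive_zeros; infer_instance

-- ===== CLAIM (what is proved, stated in full; the proofs are below) =====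
def Claim_equal_count_consecutive_zeros : Prop := ∀ (cov_list : List Int), Dom_count_consecutive_zeros cov_list → Spec_count_consecutive_zeros cov_list (count_consecutive_zeros cov_list)

-- ===== LEMMAS AND PROOFS =====

-- appending one element at the end: leading-zero count changes only if everything before is zero
theorem pvCountLead_append (ys : List Int) (c : Int) :
    pvCountLead (ys ++ [c]) =
      if ∀ y ∈ ys, y = 0 then (ys.length : Int) + (if c = 0 then 1 else 0)
      else pvCountLead ys := by
  induction ys with
  | nil => simp [pvCountLead]
  | cons y rest ih =>
    by_cases hy : y = 0
    · subst hy
      simp only [List.cons_append, pvCountLead, beq_self_eq_true, if_true, ih]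
      by_cases hall : ∀ y ∈ rest, y = 0
      · have hall2 : ∀ y ∈ (0 : Int) :: rest, y = 0 := by simpa using hall
        rw [if_pos hall, if_pos hall2]; simp only [List.length_cons]; push_cast; ring
      · have hall2 : ¬ ∀ y ∈ (0 : Int) :: rest, y = 0 := by
          intro h; exact hall (fun y hy => h y (List.mem_cons_of_mem _ hy))
        rw [if_neg hall, if_neg hall2]
    · simp [pvCountLead, hy]

-- first component of the fold: lead counter, frozen once seen = true
theorem pvFold_fst (xs : List Int) (l t : Int) (s : Bool) :
    (xs.foldl pvStep (l, t, s)).1 = l + (if s then 0 else pvCountLead xs) := by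
  induction xs generalizing l t s with
  | nil => simp [pvCountLead]
  | cons c rest ih =>
    by_cases hc : c = 0
    · subst hc
      cases s <;> simp [pvStep, pvCountLead, ih] <;> ring
    · cases s <;> simp [pvStep, pvCountLead, hc, ih]

-- middle component of the fold: trailing-zero counter
theorem pvFold_trail (xs : List Int) (l t : Int) (s : Bool) :
    (xs.foldl pvStep (l, t, s)).2.1 =
      if ∀ x ∈ xs, x = 0 then t + (xs.length : Int)
      else pvCountLead xs.reverse := by
  induction xs generalizing l t s with
  | nil => simp [pvCountLead]
  | cons c rest ih =>
    by_cases hc : c = 0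
    · subst hc
      simp only [List.foldl_cons, pvStep, beq_self_eq_true, if_true, ih]
      by_cases hall : ∀ x ∈ rest, x = 0
      · have hall2 : ∀ x ∈ (0 : Int) :: rest, x = 0 := by simpa using hall
        rw [if_pos hall, if_pos hall2]; simp only [List.length_cons]; push_cast; ring
      · have hall' : ¬ ∀ x ∈ (0 : Int) :: rest, x = 0 := by
          intro h; exact hall (fun x hx => h x (List.mem_cons_of_mem _ hx))
        simp only [hall, hall', if_false, List.reverse_cons, pvCountLead_append]
        have hrev : ¬ ∀ y ∈ rest.reverse, y = 0 := by
          simpa using hall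
        simp [hrev]
        exact fun h => absurd h hall
    · have hall' : ¬ ∀ x ∈ c :: rest, x = 0 := by
        intro h; exact hc (h c List.mem_cons_self)
      simp only [List.foldl_cons, pvStep, beq_iff_eq, hc, if_false, ih, hall', List.reverse_cons]
      by_cases hall : ∀ x ∈ rest, x = 0
      · have hrev : ∀ y ∈ rest.reverse, y = 0 := by simpa using hall
        simp [hall, pvCountLead_append, hrev, hc]
      · have hrev : ¬ ∀ y ∈ rest.reverse, y = 0 := by simpa using hall
        simp [hall, pvCountLead_append, hrev]

-- all-zero lists: the leading-zero count is the length
theorem pvCountLead_all_zero (xs : List Int) (h : ∀ x ∈ xs, x = 0) :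
    pvCountLead xs = (xs.length : Int) := by
  induction xs with
  | nil => simp [pvCountLead]
  | cons c rest ih =>
    have hc : c = 0 := h c List.mem_cons_self
    subst hc
    simp only [pvCountLead, beq_self_eq_true, if_true, ih (fun x hx => h x (List.mem_cons_of_mem _ hx)),
      List.length_cons]
    push_cast; ring

-- ===== VERDICT (by name: the statement is the Claim_ definition above) =====
theorem count_consecutive_zeros_spec : Claim_equal_count_consecutive_zeros := by
  intro xs _
  unfold Spec_count_consecutive_zeros count_consecutive_zeros count_consecutive_zeros_alt
  simp only [pvFold_fst, pvFold_trail, if_false, Bool.false_eq_true, zero_add]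
  by_cases hall : ∀ x ∈ xs, x = 0
  · have hrev : ∀ y ∈ xs.reverse, y = 0 := by simpa using hall
    simp [pvCountLead_all_zero xs hall, pvCountLead_all_zero xs.reverse hrev]
  · simp [hall]
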